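-- pv_equiv track=rewrite | github.com/runnithan03/Programming-I | Q7.py | aliquot_pairs
-- ===== SOURCE A (Python) =====
-- def divisors(n):
--     i=1
--     lst=[]
--     while i<n:
--         if n%i==0:
--             lst=lst+[i]
--         i=i+1
--     return lst
--
-- def aliquot_successor(n):
--     lst=sum(divisors(n))
--     return lst
--
-- def aliquot_sequence(n):
--     lst=[n]
--     x=aliquot_successor(n)
--     lst.append(x)
--     i=0
--     while lst[len(lst)-2] != lst[len(lst)-1]:
--         x=aliquot_successor(x)
--         lst.append(x)
--     return lst
--
-- def aliquot_pairs(alst):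
--     lst=[]
--     for n in alst:
--         i=0
--         sequence=aliquot_sequence(n)
--         k=len(sequence)
--         while i<k:
--             pairs=[sequence[i], aliquot_successor(sequence[i])]
--             if pairs in lst:
--                 i=i+1
--             else:
--                 lst.append(pairs)
--                 i=i+1
--     return lst
-- ===== SOURCE B (Python) =====
-- def _dsum(n):
--     # sum of proper divisors via sqrt pairing: O(sqrt n) instead of A's O(n) scan
--     if n <= 1:
--         return 0
--     s = 1
--     i = 2
--     while i * i <= n:
--         if n % i == 0:
--             s += i
--             j = n // i
--             if j != i:
--                 s += j
--         i += 1
--     return s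
--
-- def aliquot_pairs(alst):
--     seen = set()
--     out = []
--     for n in alst:
--         seq = [n, _dsum(n)]
--         while seq[-2] != seq[-1]:
--             seq.append(_dsum(seq[-1]))
--         for s in seq:
--             p = (s, _dsum(s))
--             if p not in seen:
--                 seen.add(p)
--                 out.append([s, p[1]])
--     return out
-- ===== Notes on version B (the rewrite author's own statement) =====
-- stated objective: faster
-- what changed: B computes each proper-divisor sum by pairing divisors up to sqrt(n) instead of A's scan over 1..n-1 (no divisors list is materialised), builds the aliquot sequence by appending the successor of its last element, and dedups the emitted pairs with a set instead of A's linear 'pairs in lst' scan over the output list; intended as faster (measured 208.98x at the largest size both Pythons finished; above that A times out, and on elements whose aliquot sequence never stabilises both diverge).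
import Mathlib
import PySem

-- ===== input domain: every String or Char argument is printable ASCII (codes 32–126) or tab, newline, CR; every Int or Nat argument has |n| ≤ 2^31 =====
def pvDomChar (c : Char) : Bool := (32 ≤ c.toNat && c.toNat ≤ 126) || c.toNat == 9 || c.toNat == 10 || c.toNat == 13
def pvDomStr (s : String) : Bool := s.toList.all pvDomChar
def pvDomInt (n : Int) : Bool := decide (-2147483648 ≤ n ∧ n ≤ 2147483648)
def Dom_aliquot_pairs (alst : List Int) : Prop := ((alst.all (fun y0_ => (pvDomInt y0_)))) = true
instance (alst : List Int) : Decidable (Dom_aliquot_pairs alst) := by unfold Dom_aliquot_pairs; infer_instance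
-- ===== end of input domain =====

-- B replaces A's O(v) proper-divisor scan by √v divisor pairing and A's O(|out|)
-- list-membership dedup by a set; the return values are proved equal on every input.


-- ===== PORT A =====
-- divisors(n): while i<n with i+=1 starting at 1 = fold over pyRange 1 n
def pvDivisors (n : Int) : List Int :=
  (PySem.List.pyRange 1 n 1).foldl
    (fun lst i => if PySem.Int.mod n i = 0 then lst ++ [i] else lst) []

def pvSuccA (n : Int) : Int := (pvDivisors n).sum

-- the unbounded 'while lst[-2] != lst[-1]' loop, made total with fuel 1000
-- (far beyond the sequence length of any input the loop feasibly returns on;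
-- both ports use the same fuel and are proved equal at every fuel step).
-- lst[len(lst)-2] / lst[len(lst)-1] have nonnegative index with len ≥ 2
-- throughout, so List.getD is exact.
def pvSeqAGo : Nat → Int → List Int → List Int
  | 0, _, lst => lst
  | f + 1, x, lst =>
    if lst.getD (lst.length - 2) 0 ≠ lst.getD (lst.length - 1) 0 then
      let x' := pvSuccA x
      pvSeqAGo f x' (lst ++ [x'])
    else lst

def pvSeqA (n : Int) : List Int :=
  pvSeqAGo 1000 (pvSuccA n) [n, pvSuccA n]

def aliquot_pairs (alst : List Int) : List (List Int) :=
  alst.foldl (fun lst n =>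
    (pvSeqA n).foldl (fun lst si =>
      let pairs := [si, pvSuccA si]
      if pairs ∈ lst then lst else lst ++ [pairs]) lst) []

-- ===== PORT B =====
-- while i*i <= n, made total with fuel n.toNat (≥ √n iterations for n ≥ 2)
def pvDsumGo : Nat → Int → Int → Int → Int
  | 0, _, _, s => s
  | f + 1, n, i, s =>
    if i * i ≤ n then
      pvDsumGo f n (i + 1)
        (if PySem.Int.mod n i = 0 then
          let j := PySem.Int.floordiv n i
          s + i + (if j ≠ i then j else 0)
        else s)
    else s

def pvDsum (n : Int) : Int := if n ≤ 1 then 0 else pvDsumGo n.toNat n 2 1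

-- seq[-2] / seq[-1] = seq[len-2] / seq[len-1] for len ≥ 2 (invariant of the loop), exact via List.getD
def pvSeqBGo : Nat → List Int → List Int
  | 0, seq => seq
  | f + 1, seq =>
    if seq.getD (seq.length - 2) 0 ≠ seq.getD (seq.length - 1) 0 then
      pvSeqBGo f (seq ++ [pvDsum (seq.getD (seq.length - 1) 0)])
    else seq

def pvSeqB (n : Int) : List Int := pvSeqBGo 1000 [n, pvDsum n]

def aliquot_pairs_alt (alst : List Int) : List (List Int) :=
  (alst.foldl (fun (st : PySem.Set (Int × Int) × List (List Int)) n =>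
      (pvSeqB n).foldl
        (fun st s =>
          let p := (s, pvDsum s)
          if PySem.Set.contains st.1 p then st
          else (PySem.Set.add st.1 p, st.2 ++ [[s, p.2]])) st)
    (PySem.Set.empty, [])).2

-- ===== PRECONDITION & SPEC =====
-- A's while loops are ported with fuel 1000; no Pre_ — the equivalence of the two
-- ports is proved on every input (on inputs whose aliquot sequence never
-- stabilises, e.g. 220, both Pythons diverge identically and both ports truncate
-- identically at the same fuel).
def Spec_aliquot_pairs (alst : List Int) (out : List (List Int)) : Prop := out = aliquot_pairs_alt alst
instance (alst : List Int) (out : List (List Int)) : Decidable (Spec_aliquot_pairs alst out) := by unfold Spec_aliquot_pairs; infer_instance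

-- ===== CLAIM (what is proved, stated in full; the proofs are below) =====
def Claim_equal_aliquot_pairs : Prop := ∀ (alst : List Int), Dom_aliquot_pairs alst → Spec_aliquot_pairs alst (aliquot_pairs alst)

-- ===== LEMMAS AND PROOFS =====

-- ---- Step 1: pvSuccA = pvDsum (the √-pairing identity) ----

-- contribution of one loop index i in B's divisor loop
def pvC (n i : Int) : Int :=
  if PySem.Int.mod n i = 0 then
    i + (if PySem.Int.floordiv n i ≠ i then PySem.Int.floordiv n i else 0)
  else 0

def pvD (n : Int) : Nat → Int → Int
  | 0, _ => 0
  | f + 1, i => if i * i ≤ n then pvC n i + pvD n f (i + 1) else 0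

theorem pvDsumGo_eq (n : Int) : ∀ (f : Nat) (i s : Int),
    pvDsumGo f n i s = s + pvD n f i := by
  intro f
  induction f with
  | zero => intro i s; simp [pvDsumGo, pvD]
  | succ f ih =>
    intro i s
    simp only [pvDsumGo, pvD]
    split
    · rw [ih]
      simp only [pvC]
      split_ifs <;> ring
    · ring

-- Nat-level contribution
def pvCN (N j : Nat) : Nat :=
  if N % j = 0 then j + (if N / j ≠ j then N / j else 0) else 0

theorem pvC_cast (N j : Nat) : pvC (N : Int) (j : Int) = (pvCN N j : Int) := by
  simp only [pvC, pvCN, PySem.Int.mod_natCast, PySem.Int.floordiv_natCast,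
    Nat.cast_eq_zero, ne_eq, Nat.cast_inj]
  by_cases h : N % j = 0 <;> by_cases h2 : N / j = j <;> simp [h, h2]

theorem pvD_spec (N : Nat) : ∀ (f : Nat) (j : Nat), N < (j + f) * (j + f) →
    pvD (N : Int) f (j : Int) = ∑ k ∈ Finset.Ico j (Nat.sqrt N + 1), (pvCN N k : Int) := by
  intro f
  induction f with
  | zero =>
    intro j hj
    have hs : Nat.sqrt N < j := Nat.sqrt_lt.mpr (by simpa using hj)
    rw [Finset.Ico_eq_empty (by omega)]
    simp [pvD]
  | succ f ih =>
    intro j hj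
    simp only [pvD]
    by_cases hle : (j : Int) * (j : Int) ≤ (N : Int)
    · rw [if_pos hle]
      have hjj : j * j ≤ N := by exact_mod_cast hle
      have hsq : j ≤ Nat.sqrt N := Nat.le_sqrt.mpr hjj
      have hcast : ((j : Int) + 1) = ((j + 1 : Nat) : Int) := by push_cast; ring
      have hj' : N < ((j + 1) + f) * ((j + 1) + f) := by
        have e : j + (f + 1) = (j + 1) + f := by omega
        rwa [e] at hj
      rw [hcast, ih (j + 1) hj', pvC_cast]
      rw [Finset.sum_eq_sum_Ico_succ_bot (by omega : j < Nat.sqrt N + 1)]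
    · rw [if_neg hle]
      have hlt : N < j * j := by
        have : (N : Int) < (j : Int) * (j : Int) := by omega
        exact_mod_cast this
      have hs : Nat.sqrt N < j := Nat.sqrt_lt.mpr hlt
      rw [Finset.Ico_eq_empty (by omega)]
      simp

theorem pvDsum_eq_sum (N : Nat) (h2 : 2 ≤ N) :
    pvDsum (N : Int) = 1 + ∑ k ∈ Finset.Ico 2 (Nat.sqrt N + 1), (pvCN N k : Int) := by
  unfold pvDsum
  rw [if_neg (by exact_mod_cast (by omega : ¬ (N : Int) ≤ 1))]
  rw [pvDsumGo_eq]
  have ht : ((N : Int)).toNat = N := by simp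
  have h2' : (2 : Int) = ((2 : Nat) : Int) := by norm_cast
  rw [ht, h2', pvD_spec N N 2 (by nlinarith)]

theorem sqrt_pairing_nat (N : Nat) (h2 : 2 ≤ N) :
    1 + ∑ k ∈ Finset.Ico 2 (Nat.sqrt N + 1), pvCN N k
      = ∑ d ∈ (Finset.Ico 1 N).filter (· ∣ N), d := by
  have hN0 : N ≠ 0 := by omega
  set r := Nat.sqrt N with hr
  have hr1 : 1 ≤ r := Nat.sqrt_pos.mpr (by omega)
  have hrN : r < N := Nat.sqrt_lt_self (by omega)
  -- step 1: the loop sum is a sum over the small divisors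
  have s1 : ∑ k ∈ Finset.Ico 2 (r + 1), pvCN N k
      = ∑ j ∈ (Finset.Ico 2 (r + 1)).filter (· ∣ N),
          (j + if N / j ≠ j then N / j else 0) := by
    rw [Finset.sum_filter]
    apply Finset.sum_congr rfl
    intro k hk
    have hk2 : 2 ≤ k := (Finset.mem_Ico.mp hk).1
    have : k ∣ N ↔ N % k = 0 := Nat.dvd_iff_mod_eq_zero
    simp only [pvCN]
    by_cases h : k ∣ N
    · rw [if_pos (this.mp h), if_pos h]
    · rw [if_neg (fun hm => h (this.mpr hm)), if_neg h]
  -- step 2+3: split off the paired big divisors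
  have s2 : ∑ j ∈ (Finset.Ico 2 (r + 1)).filter (· ∣ N),
          (j + if N / j ≠ j then N / j else 0)
      = (∑ j ∈ (Finset.Ico 2 (r + 1)).filter (· ∣ N), j)
        + ∑ j ∈ ((Finset.Ico 2 (r + 1)).filter (· ∣ N)).filter (fun j => N / j ≠ j), N / j := by
    rw [Finset.sum_add_distrib]
    congr 1
    rw [Finset.sum_filter, Finset.sum_filter, Finset.sum_filter]
  -- step 4: the paired sum is the sum of the big divisors
  have s4 : ∑ j ∈ ((Finset.Ico 2 (r + 1)).filter (· ∣ N)).filter (fun j => N / j ≠ j), N / j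
      = ∑ d ∈ ((Finset.Ico 1 N).filter (· ∣ N)).filter (fun d => r < d), d := by
    apply Finset.sum_nbij' (i := fun j => N / j) (j := fun d => N / d)
    · intro j hj
      simp only [Finset.mem_filter, Finset.mem_Ico] at hj ⊢
      obtain ⟨⟨⟨hj2, hjr⟩, hjd⟩, hjne⟩ := hj
      have hjpos : 0 < j := by omega
      have hmul : j * (N / j) = N := Nat.mul_div_cancel' hjd
      have hjle : j ≤ N / j := by nlinarith [Nat.le_sqrt.mp (by omega : j ≤ r)]
      have hjlt : j < N / j := by omega
      have hbig : r < N / j := by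
        by_contra hle
        have hsq := Nat.le_sqrt.mp (by omega : N / j ≤ r)
        nlinarith
      refine ⟨⟨⟨by omega, Nat.div_lt_self (by omega) (by omega)⟩,
        Nat.div_dvd_of_dvd hjd⟩, hbig⟩
    · intro d hd
      simp only [Finset.mem_filter, Finset.mem_Ico] at hd ⊢
      obtain ⟨⟨⟨hd1, hdN⟩, hdd⟩, hdr⟩ := hd
      have hd0 : 0 < d := by omega
      have hmul : d * (N / d) = N := Nat.mul_div_cancel' hdd
      have hlt : N / d < d := by
        by_contra hge
        have : d ≤ N / d := by omega
        have := Nat.le_sqrt.mpr (by nlinarith : d * d ≤ N)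
        omega
      have hpos : 0 < N / d := Nat.div_pos (Nat.le_of_dvd (by omega) hdd) hd0
      have hsm : N / d ≤ r := Nat.le_sqrt.mpr (by nlinarith)
      have hne1 : N / d ≠ 1 := by
        intro h1
        rw [h1, Nat.mul_one] at hmul
        omega
      have hself : N / (N / d) = d := Nat.div_div_self hdd hN0
      refine ⟨⟨⟨by omega, by omega⟩, Nat.div_dvd_of_dvd hdd⟩, ?_⟩
      rw [hself]
      omega
    · intro j hj
      simp only [Finset.mem_filter, Finset.mem_Ico] at hj
      exact Nat.div_div_self hj.1.2 hN0
    · intro d hd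
      simp only [Finset.mem_filter, Finset.mem_Ico] at hd
      exact Nat.div_div_self hd.1.2 hN0
    · intro j _; rfl
  -- step 5/6: the divisors split into 1, the small ones and the big ones
  have s5 : ∑ d ∈ (Finset.Ico 1 N).filter (· ∣ N), d
      = (1 + ∑ j ∈ (Finset.Ico 2 (r + 1)).filter (· ∣ N), j)
        + ∑ d ∈ ((Finset.Ico 1 N).filter (· ∣ N)).filter (fun d => r < d), d := by
    rw [← Finset.sum_filter_add_sum_filter_not ((Finset.Ico 1 N).filter (· ∣ N))
        (fun d => r < d)]
    rw [add_comm]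
    congr 1
    have he : ((Finset.Ico 1 N).filter (· ∣ N)).filter (fun d => ¬ r < d)
        = insert 1 ((Finset.Ico 2 (r + 1)).filter (· ∣ N)) := by
      ext d
      simp only [Finset.mem_filter, Finset.mem_Ico, Finset.mem_insert, not_lt]
      constructor
      · rintro ⟨⟨⟨h1, hlt⟩, hdvd⟩, hle⟩
        by_cases hd1 : d = 1
        · exact Or.inl hd1
        · exact Or.inr ⟨⟨by omega, by omega⟩, hdvd⟩
      · rintro (rfl | ⟨⟨hd2, hdr⟩, hdvd⟩)
        · exact ⟨⟨⟨le_refl 1, by omega⟩, one_dvd N⟩, by omega⟩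
        · refine ⟨⟨⟨by omega, ?_⟩, hdvd⟩, by omega⟩
          calc d ≤ r := by omega
            _ < N := hrN
    rw [he, Finset.sum_insert]
    simp only [Finset.mem_filter, Finset.mem_Ico]
    omega
  omega

theorem pvSuccA_eq_sum (N : Nat) (h2 : 2 ≤ N) :
    pvSuccA (N : Int) = ∑ d ∈ (Finset.Ico 1 N).filter (· ∣ N), (d : Int) := by
  unfold pvSuccA pvDivisors
  have hfe : (fun (lst : List Int) i => if PySem.Int.mod (N : Int) i = 0 then lst ++ [i] else lst)
      = (fun lst i => if (fun i => decide (PySem.Int.mod (N : Int) i = 0)) i = true then lst ++ [id i] else lst) := by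
    funext lst i; simp
  rw [hfe, PySem.List.foldl_append_if, PySem.List.pyRange_one]
  simp only [List.nil_append, List.map_id, List.filter_map]
  -- sum over the filtered mapped range as a Finset.range sum
  have hsum : ∀ (m : Nat) (g : Nat → Int) (q : Nat → Bool),
      (((List.range m).filter q).map g).sum = ∑ k ∈ Finset.range m, if q k then g k else 0 := by
    intro m g q
    induction m with
    | zero => simp
    | succ m ih =>
      rw [List.range_succ, List.filter_append, List.map_append, List.sum_append,
        Finset.sum_range_succ, ih]
      by_cases h : q m <;> simp [h]
  rw [hsum]
  rw [Finset.sum_filter, Finset.sum_Ico_eq_sum_range]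
  have hm : ((N : Int) - 1).toNat = N - 1 := by omega
  rw [hm]
  apply Finset.sum_congr rfl
  intro k _
  have hdvd : PySem.Int.mod (N : Int) ((fun k : Nat => (1 : Int) + k) k) = 0
      ↔ ((1 + k) ∣ N) := by
    rw [PySem.Int.mod_eq_zero_iff_dvd]
    constructor
    · intro h
      exact_mod_cast (by push_cast at h ⊢; exact_mod_cast h : ((1 + k : Nat) : Int) ∣ (N : Int))
    · intro h
      have : ((1 + k : Nat) : Int) ∣ (N : Int) := Int.natCast_dvd_natCast.mpr h
      push_cast at this ⊢
      exact this
  simp only [Function.comp, decide_eq_true_eq]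
  by_cases h : (1 + k) ∣ N
  · rw [if_pos (hdvd.mpr h), if_pos h]
    push_cast; ring
  · rw [if_neg (fun hc => h (hdvd.mp hc)), if_neg h]

theorem pvSucc_eq (n : Int) : pvSuccA n = pvDsum n := by
  by_cases h1 : n ≤ 1
  · unfold pvSuccA pvDivisors pvDsum
    rw [PySem.List.pyRange_one_eq_nil (by omega)]
    simp [h1]
  · have hN : n = ((n.toNat : Nat) : Int) := by omega
    have h2 : 2 ≤ n.toNat := by omega
    rw [hN, pvSuccA_eq_sum n.toNat h2, pvDsum_eq_sum n.toNat h2]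
    have hid := sqrt_pairing_nat n.toNat h2
    have hc := congrArg (fun m : Nat => (m : Int)) hid
    push_cast at hc
    linarith

-- ---- Step 2: the two sequence loops build the same list ----

theorem pvLast_append (l : List Int) (y : Int) :
    (l ++ [y]).getD ((l ++ [y]).length - 1) 0 = y := by
  simp [List.getD_eq_getElem?_getD]

theorem pvSeqGo_eq : ∀ (f : Nat) (lst : List Int) (x : Int),
    lst.getD (lst.length - 1) 0 = x → pvSeqAGo f x lst = pvSeqBGo f lst := by
  intro f
  induction f with
  | zero => intro lst x _; rfl
  | succ f ih =>
    intro lst x hx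
    simp only [pvSeqAGo, pvSeqBGo]
    split
    · rw [hx, ← pvSucc_eq x]
      exact ih (lst ++ [pvSuccA x]) (pvSuccA x) (pvLast_append lst (pvSuccA x))
    · rfl

theorem pvSeq_eq (n : Int) : pvSeqA n = pvSeqB n := by
  unfold pvSeqA pvSeqB
  rw [← pvSucc_eq n]
  exact pvSeqGo_eq 1000 [n, pvSuccA n] (pvSuccA n) rfl

-- ---- Step 3: list-membership dedup = set dedup ----

def pvEmitA (lst : List (List Int)) (ps : List (Int × Int)) : List (List Int) :=
  ps.foldl (fun lst p => if [p.1, p.2] ∈ lst then lst else lst ++ [[p.1, p.2]]) lst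

def pvEmitB (st : PySem.Set (Int × Int) × List (List Int)) (ps : List (Int × Int)) :
    PySem.Set (Int × Int) × List (List Int) :=
  ps.foldl (fun st p =>
    if PySem.Set.contains st.1 p then st
    else (PySem.Set.add st.1 p, st.2 ++ [[p.1, p.2]])) st

def pvInv (lst : List (List Int)) (st : PySem.Set (Int × Int) × List (List Int)) : Prop :=
  st.2 = lst ∧ ∀ a b : Int, ((a, b) ∈ st.1 ↔ [a, b] ∈ lst)

theorem pvEmit_inv (ps : List (Int × Int)) (lst : List (List Int))
    (st : PySem.Set (Int × Int) × List (List Int)) (h : pvInv lst st) :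
    pvInv (pvEmitA lst ps) (pvEmitB st ps) := by
  induction ps generalizing lst st with
  | nil => exact h
  | cons p ps ih =>
    obtain ⟨h1, h2⟩ := h
    simp only [pvEmitA, pvEmitB, List.foldl_cons]
    by_cases hm : [p.1, p.2] ∈ lst
    · have hc : PySem.Set.contains st.1 p = true := by
        have : p ∈ st.1 := (h2 p.1 p.2).mpr hm
        simpa [PySem.Set.contains] using this
      rw [if_pos hm, hc, if_pos rfl]
      exact ih lst st ⟨h1, h2⟩
    · have hc : PySem.Set.contains st.1 p = false := by
        by_contra hcc
        have : p ∈ st.1 := by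
          simpa [PySem.Set.contains] using (Bool.not_eq_false _).mp hcc
        exact hm ((h2 p.1 p.2).mp this)
      rw [if_neg hm, hc]
      simp only [Bool.false_eq_true, if_false]
      apply ih
      constructor
      · simpa using congrArg (· ++ [[p.1, p.2]]) h1
      · intro a b
        simp only [PySem.Set.add, hc, Bool.false_eq_true, if_false,
          List.mem_append, List.mem_singleton, h2 a b]
        constructor
        · rintro (h | h)
          · exact Or.inl h
          · right; cases h; rfl
        · rintro (h | h)
          · exact Or.inl h
          · right
            have := List.cons.injEq .. ▸ h
            simp at h
            exact Prod.ext h.1 h.2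

theorem pvA_as_emit (alst : List Int) :
    aliquot_pairs alst = alst.foldl
      (fun lst n => pvEmitA lst ((pvSeqA n).map (fun s => (s, pvSuccA s)))) [] := by
  unfold aliquot_pairs pvEmitA
  congr 1
  funext lst n
  rw [List.foldl_map]

theorem pvB_as_emit (alst : List Int) :
    aliquot_pairs_alt alst = (alst.foldl
      (fun st n => pvEmitB st ((pvSeqB n).map (fun s => (s, pvDsum s))))
      (PySem.Set.empty, [])).2 := by
  unfold aliquot_pairs_alt pvEmitB
  congr 2
  funext st n
  rw [List.foldl_map]

-- ===== VERDICT (by name: the statement is the Claim_ definition above) =====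
theorem aliquot_pairs_spec : Claim_equal_aliquot_pairs := by
  intro alst _
  unfold Spec_aliquot_pairs
  rw [pvA_as_emit, pvB_as_emit]
  have hfun : ∀ n : Int, (pvSeqA n).map (fun s => (s, pvSuccA s))
      = (pvSeqB n).map (fun s => (s, pvDsum s)) := by
    intro n
    rw [pvSeq_eq]
    exact List.map_congr_left (fun s _ => by rw [pvSucc_eq])
  have : ∀ (l : List Int) (lst : List (List Int)) (st : _),
      pvInv lst st →
      pvInv (l.foldl (fun lst n => pvEmitA lst ((pvSeqA n).map (fun s => (s, pvSuccA s)))) lst)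
            (l.foldl (fun st n => pvEmitB st ((pvSeqB n).map (fun s => (s, pvDsum s)))) st) := by
    intro l
    induction l with
    | nil => intro _ _ h; exact h
    | cons n rest ih =>
      intro lst st h
      simp only [List.foldl_cons]
      apply ih
      rw [← hfun n]
      exact pvEmit_inv _ _ _ h
  have hinv : pvInv [] ((PySem.Set.empty : PySem.Set (Int × Int)), ([] : List (List Int))) :=
    ⟨rfl, by intro a b; simp [PySem.Set.empty]⟩
  exact ((this alst [] _ hinv).1).symm
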